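-- pv_equiv track=rewrite | github.com/Awiomanik/Advent_of_Code_2023 | Solutions/2023/Day12/EVENT.py | pruning_check_bitwise
-- ===== SOURCE A (Python) =====
-- def pruning_check_bitwise(operational, damaged, valid, length):
--     ''''''
--     # set variables
--     current_counter = 0
--     valid_index = 0
--     bit_mask = 1
--
--     # iterate over springs
--     for _ in range(length):
--         # encountered dameged spring
--         if damaged & bit_mask:
--             current_counter += 1
--         # encountered operational spring
--         elif operational & bit_mask:
--             if current_counter != 0:
--                 # check for pruning
--                 if valid_index >= len(valid) \
--                 or current_counter > valid[valid_index]: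
--                     return True
--                 valid_index += 1
--                 current_counter = 0
--         # encountered unset spring
--         else:
--             break
--         bit_mask <<= 1
--
--     # add remainning springs
--     if current_counter != 0:
--         # check for pruning
--         if valid_index >= len(valid) \
--         or current_counter > valid[valid_index]:
--             return True
--
--     return False
-- ===== SOURCE B (Python) =====
-- def pruning_check_bitwise(operational, damaged, valid, length):
--     # Two-pass decomposition: pass 1 extracts damaged runs by shifting the
--     # bit patterns right; pass 2 validates runs against `valid` by walking it.
--     groups = []
--     run = 0
--     o, d = operational, damaged
--     for _ in range(length):
--         if d & 1:
--             run += 1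
--         elif o & 1:
--             if run:
--                 groups.append(run)
--                 run = 0
--         else:
--             break
--         o >>= 1
--         d >>= 1
--     rem = valid
--     for g in groups:
--         if not rem or g > rem[0]:
--             return True
--         rem = rem[1:]
--     if run:
--         return not rem or run > rem[0]
--     return False
-- ===== Notes on version B (the rewrite author's own statement) =====
-- stated objective: alternative
-- what changed: A's single fused loop (mask shifted left, counter and valid-index checked inline with early returns) is replaced by a two-pass decomposition: pass 1 extracts the list of closed damaged runs plus the pending trailing run by shifting both bit patterns right, pass 2 validates the runs by walking down the valid list.
import Mathlib
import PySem

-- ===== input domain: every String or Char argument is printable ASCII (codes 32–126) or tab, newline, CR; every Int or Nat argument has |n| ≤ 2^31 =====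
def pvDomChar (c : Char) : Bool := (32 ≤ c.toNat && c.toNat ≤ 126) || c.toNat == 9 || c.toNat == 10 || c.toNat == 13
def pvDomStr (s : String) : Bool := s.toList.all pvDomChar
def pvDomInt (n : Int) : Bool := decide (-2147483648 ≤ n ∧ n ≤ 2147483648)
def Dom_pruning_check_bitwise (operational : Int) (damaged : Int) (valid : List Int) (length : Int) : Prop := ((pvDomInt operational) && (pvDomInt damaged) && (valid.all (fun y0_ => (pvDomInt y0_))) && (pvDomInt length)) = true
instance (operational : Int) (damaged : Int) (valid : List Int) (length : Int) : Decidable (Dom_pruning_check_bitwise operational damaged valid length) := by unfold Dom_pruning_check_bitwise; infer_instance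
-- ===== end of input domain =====

-- B replaces A's fused scan-and-check loop by two passes: pass 1 extracts the list of
-- closed damaged runs (shifting the bit patterns right instead of moving a mask), pass 2
-- validates the runs and the trailing run by walking down `valid` (objective: alternative).

-- ===== PORT A =====
-- A's trailing check after the loop ('add remaining springs' block).
def pvFinishA (valid : List Int) (counter : Int) (vi : Nat) : Bool :=
  if counter ≠ 0 then
    if vi ≥ valid.length ∨ counter > valid.getD vi 0 then true else false
  else false

-- A's `for _ in range(length)` loop: state = (current_counter, valid_index, bit_mask).
def pvLoopA (operational damaged : Int) (valid : List Int) : Nat → Int → Nat → Int → Bool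
  | 0, counter, vi, _mask => pvFinishA valid counter vi
  | fuel + 1, counter, vi, mask =>
    if PySem.Int.band damaged mask ≠ 0 then
      pvLoopA operational damaged valid fuel (counter + 1) vi (mask <<< (1 : Nat))
    else if PySem.Int.band operational mask ≠ 0 then
      if counter ≠ 0 then
        if vi ≥ valid.length ∨ counter > valid.getD vi 0 then true
        else pvLoopA operational damaged valid fuel 0 (vi + 1) (mask <<< (1 : Nat))
      else pvLoopA operational damaged valid fuel counter vi (mask <<< (1 : Nat))
    else pvFinishA valid counter vi

def pruning_check_bitwise (operational : Int) (damaged : Int) (valid : List Int) (length : Int) : Bool :=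
  pvLoopA operational damaged valid length.toNat 0 0 1

-- ===== PORT B =====
-- B pass 1: collect closed damaged runs into `groups`, return them with the pending run;
-- the bit patterns are shifted right one position per step.
def pvExtractB : Nat → Int → Int → Int → List Int → List Int × Int
  | 0, _o, _d, run, groups => (groups, run)
  | fuel + 1, o, d, run, groups =>
    if PySem.Int.band d 1 ≠ 0 then
      pvExtractB fuel (o >>> (1 : Nat)) (d >>> (1 : Nat)) (run + 1) groups
    else if PySem.Int.band o 1 ≠ 0 then
      if run ≠ 0 then
        pvExtractB fuel (o >>> (1 : Nat)) (d >>> (1 : Nat)) 0 (groups ++ [run])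
      else
        pvExtractB fuel (o >>> (1 : Nat)) (d >>> (1 : Nat)) run groups
    else (groups, run)

-- B pass 2: walk `groups` against the remainder of `valid`, then check the trailing run.
def pvCheckB : List Int → List Int → Int → Bool
  | [], rem, run =>
    if run ≠ 0 then
      match rem with
      | [] => true
      | v :: _ => decide (run > v)
    else false
  | g :: gs, rem, run =>
    match rem with
    | [] => true
    | v :: vs => if g > v then true else pvCheckB gs vs run

def pruning_check_bitwise_alt (operational : Int) (damaged : Int) (valid : List Int) (length : Int) : Bool :=
  let p := pvExtractB length.toNat operational damaged 0 []
  pvCheckB p.1 valid p.2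

-- ===== PRECONDITION & SPEC =====
def Spec_pruning_check_bitwise (operational : Int) (damaged : Int) (valid : List Int) (length : Int) (out : Bool) : Prop := out = pruning_check_bitwise_alt operational damaged valid length
instance (operational : Int) (damaged : Int) (valid : List Int) (length : Int) (out : Bool) : Decidable (Spec_pruning_check_bitwise operational damaged valid length out) := by unfold Spec_pruning_check_bitwise; infer_instance

-- ===== CLAIM (what is proved, stated in full; the proofs are below) =====
def Claim_equal_pruning_check_bitwise : Prop := ∀ (operational : Int) (damaged : Int) (valid : List Int) (length : Int), Dom_pruning_check_bitwise operational damaged valid length → Spec_pruning_check_bitwise operational damaged valid length (pruning_check_bitwise operational damaged valid length)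

-- ===== LEMMAS AND PROOFS =====

theorem pvShiftLeft_pow (k : Nat) : (1 : Int) <<< k = ((2 ^ k : Nat) : Int) := by
  rw [show (1 : Int) = ((1 : Nat) : Int) from rfl, ← Int.natCast_shiftLeft]
  norm_num [Nat.shiftLeft_eq]

-- testing bit k with a moving mask (A) = testing bit 0 of the k-times-shifted value (B)
theorem pvBandBit (k : Nat) (x : Int) :
    (PySem.Int.band x ((1 : Int) <<< k) ≠ 0) ↔ (PySem.Int.band (x >>> k) 1 ≠ 0) := by
  rw [pvShiftLeft_pow]
  cases x with
  | ofNat n =>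
    have h1 : (Int.ofNat n : Int) = ((n : Nat) : Int) := rfl
    rw [h1, ← Int.natCast_shiftRight, PySem.Int.band_natCast,
        show (1 : Int) = ((1 : Nat) : Int) from rfl, PySem.Int.band_natCast]
    have ht : n &&& 2 ^ k = (n.testBit k).toNat * 2 ^ k := Nat.and_two_pow n k
    have hm : (n >>> k) &&& 1 = (n >>> k) % 2 := Nat.and_one_is_mod _
    have htb : n.testBit k = ((1 &&& (n >>> k)) != 0) := rfl
    rw [ht, hm]
    rw [Nat.one_and_eq_mod_two] at htb
    rcases Nat.mod_two_eq_zero_or_one (n >>> k) with h | h <;>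
      simp [htb, h]
  | negSucc m =>
    have hx : (Int.negSucc m) >>> k = Int.negSucc (m >>> k) := Int.negSucc_shiftRight m k
    rw [hx]
    have hneg : ∀ j : Nat, ¬ (0 : Int) ≤ Int.negSucc j := fun j =>
      not_le.mpr (Int.negSucc_lt_zero j)
    have hval : ∀ j : Nat, (-(Int.negSucc j) - 1).toNat = j := fun j => by
      simp [Int.negSucc_eq]
    unfold PySem.Int.band
    rw [if_neg (hneg m), if_pos (by positivity : (0:Int) ≤ ((2 ^ k : Nat) : Int)),
        if_neg (hneg (m >>> k)), if_pos (by norm_num : (0:Int) ≤ (1:Int))]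
    rw [hval m, hval (m >>> k)]
    have h2 : (((2 ^ k : Nat) : Int)).toNat = 2 ^ k := Int.toNat_natCast _
    have h3 : ((1 : Int)).toNat = 1 := rfl
    rw [h2, h3]
    have ht : 2 ^ k &&& m = 2 ^ k * (m.testBit k).toNat := Nat.two_pow_and m k
    have hm : 1 &&& (m >>> k) = (m >>> k) % 2 := Nat.one_and_eq_mod_two _
    have htb : m.testBit k = ((1 &&& (m >>> k)) != 0) := rfl
    rw [Nat.one_and_eq_mod_two] at htb
    rw [ht, hm]
    rcases Nat.mod_two_eq_zero_or_one (m >>> k) with h | h <;>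
      simp [htb, h]

-- pass 1 only ever appends to the accumulator
theorem pvExtract_acc : ∀ (fuel : Nat) (o d run : Int) (gs : List Int),
    pvExtractB fuel o d run gs =
      (gs ++ (pvExtractB fuel o d run []).1, (pvExtractB fuel o d run []).2) := by
  intro fuel
  induction fuel with
  | zero => intro o d run gs; simp [pvExtractB]
  | succ n ih =>
    intro o d run gs
    simp only [pvExtractB]
    split_ifs with h1 h2 h3
    · rw [ih]
    · simp only [List.nil_append]
      rw [ih _ _ _ (gs ++ [run]), ih _ _ _ [run]]
      simp [List.append_assoc]
    · rw [ih]
    · simp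

-- A's post-loop check = B's validation of an empty group list
theorem pvFinish_eq (valid : List Int) (counter : Int) (vi : Nat) (h : vi ≤ valid.length) :
    pvFinishA valid counter vi = pvCheckB [] (valid.drop vi) counter := by
  by_cases hc : counter ≠ 0
  · rcases lt_or_eq_of_le h with hlt | heq
    · have hvd : valid.drop vi = valid.getD vi 0 :: valid.drop (vi + 1) := by
        rw [List.getD_eq_getElem valid 0 hlt]
        exact (List.getElem_cons_drop hlt).symm
      by_cases hgt : counter > valid.getD vi 0 <;>
        simp [pvFinishA, pvCheckB, hvd, hc, Nat.not_le.mpr hlt]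
    · have hnil : valid.drop vi = [] := by rw [heq]; exact List.drop_length
      simp [pvFinishA, pvCheckB, hnil, hc, Nat.le_of_eq heq.symm]
  · simp [pvFinishA, pvCheckB, hc]

-- loop invariant: A's scan from bit k, counter `counter`, index `vi` equals
-- extracting the remaining runs from the shifted patterns and validating them
-- against the rest of `valid`.
theorem pvMain (op dam : Int) (valid : List Int) :
    ∀ (fuel k : Nat) (counter : Int) (vi : Nat), vi ≤ valid.length →
    pvLoopA op dam valid fuel counter vi ((1 : Int) <<< k) =
      pvCheckB (pvExtractB fuel (op >>> k) (dam >>> k) counter []).1 (valid.drop vi)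
        (pvExtractB fuel (op >>> k) (dam >>> k) counter []).2 := by
  intro fuel
  induction fuel with
  | zero =>
    intro k counter vi h
    simpa [pvLoopA, pvExtractB] using pvFinish_eq valid counter vi h
  | succ n ih =>
    intro k counter vi h
    have e1 : ((1 : Int) <<< k) <<< (1 : Nat) = (1 : Int) <<< (k + 1) :=
      (Int.shiftLeft_add 1 k 1).symm
    have e2 : (op >>> k) >>> (1 : Nat) = op >>> (k + 1) := (Int.shiftRight_add op k 1).symm
    have e3 : (dam >>> k) >>> (1 : Nat) = dam >>> (k + 1) := (Int.shiftRight_add dam k 1).symm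
    simp only [pvLoopA, pvExtractB]
    by_cases hd : PySem.Int.band (dam >>> k) 1 ≠ 0
    · have hd' : PySem.Int.band dam ((1 : Int) <<< k) ≠ 0 := (pvBandBit k dam).mpr hd
      rw [if_pos hd', if_pos hd, e1, e2, e3]
      exact ih (k + 1) (counter + 1) vi h
    · have hd' : ¬ PySem.Int.band dam ((1 : Int) <<< k) ≠ 0 :=
        fun hh => hd ((pvBandBit k dam).mp hh)
      rw [if_neg hd', if_neg hd]
      by_cases ho : PySem.Int.band (op >>> k) 1 ≠ 0
      · have ho' : PySem.Int.band op ((1 : Int) <<< k) ≠ 0 := (pvBandBit k op).mpr ho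
        rw [if_pos ho', if_pos ho]
        by_cases hc : counter ≠ 0
        · rw [if_pos hc, if_pos hc]
          rw [show ([] : List Int) ++ [counter] = [counter] from rfl,
              pvExtract_acc n _ _ 0 [counter]]
          rcases lt_or_eq_of_le h with hlt | heq
          · have hvd : valid.drop vi = valid.getD vi 0 :: valid.drop (vi + 1) := by
              rw [List.getD_eq_getElem valid 0 hlt]
              exact (List.getElem_cons_drop hlt).symm
            rw [hvd]
            simp only [List.cons_append, List.nil_append, pvCheckB]
            by_cases hgt : counter > valid.getD vi 0
            · rw [if_pos (Or.inr hgt), if_pos hgt]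
            · have hcond : ¬ (vi ≥ valid.length ∨ counter > valid.getD vi 0) := by
                exact not_or.mpr ⟨by omega, hgt⟩
              rw [if_neg hcond, if_neg hgt, e1, e2, e3]
              exact ih (k + 1) 0 (vi + 1) hlt
          · have hnil : valid.drop vi = [] := by rw [heq]; exact List.drop_length
            rw [hnil]
            simp only [List.cons_append, List.nil_append, pvCheckB]
            rw [if_pos (Or.inl (Nat.le_of_eq heq.symm))]
        · rw [if_neg hc, if_neg hc, e1, e2, e3]
          exact ih (k + 1) counter vi h
      · have ho' : ¬ PySem.Int.band op ((1 : Int) <<< k) ≠ 0 :=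
          fun hh => ho ((pvBandBit k op).mp hh)
        rw [if_neg ho', if_neg ho]
        exact pvFinish_eq valid counter vi h

-- ===== VERDICT (by name: the statement is the Claim_ definition above) =====
theorem pruning_check_bitwise_spec : Claim_equal_pruning_check_bitwise := by
  intro op dam valid length _dom
  unfold Spec_pruning_check_bitwise pruning_check_bitwise pruning_check_bitwise_alt
  have h := pvMain op dam valid length.toNat 0 0 0 (Nat.zero_le _)
  simpa [Int.shiftRight_zero, Int.shiftLeft_zero] using h
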